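-- pv_equiv track=rewrite | github.com/GUD-Luen/coding_test | programmers/level1/42840.py | solution
-- ===== SOURCE A (Python) =====
-- supo1 = [1, 2, 3, 4, 5]
--
-- supo2 = [2, 1, 2, 3, 2, 4, 2, 5]
--
-- supo3 = [3, 3, 1, 1, 2, 2, 4, 4, 5, 5]
--
-- def solution(answers):
--     answer = []
--     points = [0] * 3
--     for i in range(len(answers)):
--         if answers[i] == supo1[i % 5]:
--             points[0] += 1
--         if answers[i] == supo2[i % 8]:
--             points[1] += 1
--         if answers[i] == supo3[i % 10]:
--             points[2] += 1
--     for i in range(len(points)):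
--         if points[i] == max(points):
--             answer.append(i + 1)
--     return answer
-- ===== SOURCE B (Python) =====
-- supo1 = [1, 2, 3, 4, 5]
--
-- supo2 = [2, 1, 2, 3, 2, 4, 2, 5]
--
-- supo3 = [3, 3, 1, 1, 2, 2, 4, 4, 5, 5]
--
-- def solution(answers):
--     # The three patterns repeat jointly with period lcm(5, 8, 10) = 40, so one pass
--     # builds a frequency table keyed by (index mod 40, answer value); each pattern's
--     # score is then 40 table lookups instead of per-element pattern comparisons.
--     freq = {}
--     for i, a in enumerate(answers):
--         k = (i % 40, a)
--         freq[k] = freq.get(k, 0) + 1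
--     points = [sum(freq.get((r, supo[r % n]), 0) for r in range(40))
--               for supo, n in ((supo1, 5), (supo2, 8), (supo3, 10))]
--     mx = max(points)
--     return [j + 1 for j, p in enumerate(points) if p == mx]
-- ===== Notes on version B (the rewrite author's own statement) =====
-- stated objective: alternative
-- what changed: A compares every answer against all three patterns in one interleaved loop; B exploits that the patterns repeat jointly with period lcm(5,8,10)=40, builds a frequency dictionary keyed by (index mod 40, answer) in one pass, and computes each pattern's score as 40 dictionary lookups; top indices are then selected by an enumerate filter.
import Mathlib
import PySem

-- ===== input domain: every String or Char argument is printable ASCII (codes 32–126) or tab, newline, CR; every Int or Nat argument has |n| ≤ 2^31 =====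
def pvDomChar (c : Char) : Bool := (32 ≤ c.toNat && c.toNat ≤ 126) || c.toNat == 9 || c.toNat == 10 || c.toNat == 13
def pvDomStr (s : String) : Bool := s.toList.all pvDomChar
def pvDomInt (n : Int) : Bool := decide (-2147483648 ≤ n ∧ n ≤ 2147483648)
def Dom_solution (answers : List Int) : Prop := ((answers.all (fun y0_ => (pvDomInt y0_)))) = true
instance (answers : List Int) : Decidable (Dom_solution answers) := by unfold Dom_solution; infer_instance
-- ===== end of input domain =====

-- B replaces A's per-element three-pattern comparison loop by a frequency dictionary keyed by
-- (index mod 40, answer) — 40 = lcm(5,8,10), the joint period of the patterns — built in one pass,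
-- from which each pattern's score is 40 lookups (objective: alternative algorithm, same cost).

-- ===== PORT A =====
def supo1L : List Int := [1, 2, 3, 4, 5]
def supo2L : List Int := [2, 1, 2, 3, 2, 4, 2, 5]
def supo3L : List Int := [3, 3, 1, 1, 2, 2, 4, 4, 5, 5]

-- the body of A's first for-loop: three in-place updates of the 3-element list points
def stepA (answers : List Int) (pts : List Int) (i : Int) : List Int :=
  let pts := if PySem.List.pyGetD answers i 0 = PySem.List.pyGetD supo1L (PySem.Int.mod i 5) 0
             then pts.set 0 (pts.getD 0 0 + 1) else pts
  let pts := if PySem.List.pyGetD answers i 0 = PySem.List.pyGetD supo2L (PySem.Int.mod i 8) 0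
             then pts.set 1 (pts.getD 1 0 + 1) else pts
  let pts := if PySem.List.pyGetD answers i 0 = PySem.List.pyGetD supo3L (PySem.Int.mod i 10) 0
             then pts.set 2 (pts.getD 2 0 + 1) else pts
  pts

-- one interleaved pass over range(len(answers)), then the selection loop over range(len(points))
def solution (answers : List Int) : List Int :=
  let points : List Int :=
    (PySem.List.pyRange 0 (answers.length : Int) 1).foldl (stepA answers) [0, 0, 0]
  (PySem.List.pyRange 0 (points.length : Int) 1).foldl (fun ans i =>
    if PySem.List.pyGetD points i 0 = (PySem.List.max? points (fun y => y)).getD 0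
    then ans ++ [i + 1] else ans) []

-- ===== PORT B =====
-- the dict-building loop: for i, a in enumerate(answers): k = (i % 40, a); freq[k] = freq.get(k, 0) + 1
def freqB (answers : List Int) : PySem.Dict (Int × Int) Int :=
  (PySem.List.enumerate answers).foldl
    (fun d p =>
      let k : Int × Int := (PySem.Int.mod p.1 40, p.2)
      d.insert k (d.getD k 0 + 1))
    PySem.Dict.empty

-- sum(freq.get((r, supo[r % n]), 0) for r in range(40))
def scoreB (freq : PySem.Dict (Int × Int) Int) (supo : List Int) (n : Int) : Int :=
  ((PySem.List.pyRange 0 40 1).map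
    (fun r => freq.getD (r, PySem.List.pyGetD supo (PySem.Int.mod r n) 0) 0)).sum

def solution_alt (answers : List Int) : List Int :=
  let freq := freqB answers
  let points : List Int := [scoreB freq supo1L 5, scoreB freq supo2L 8, scoreB freq supo3L 10]
  let mx := (PySem.List.max? points (fun y => y)).getD 0
  ((PySem.List.enumerate points).filter (fun p => p.2 == mx)).map (fun p => p.1 + 1)

-- ===== PRECONDITION & SPEC =====
def Spec_solution (answers : List Int) (out : List Int) : Prop := out = solution_alt answers
instance (answers : List Int) (out : List Int) : Decidable (Spec_solution answers out) := by unfold Spec_solution; infer_instance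

-- ===== CLAIM (what is proved, stated in full; the proofs are below) =====
def Claim_equal_solution : Prop := ∀ (answers : List Int), Dom_solution answers → Spec_solution answers (solution answers)

-- ===== LEMMAS AND PROOFS =====

-- per-pattern indicator for index i
def indic (answers supo : List Int) (n : Int) (i : Int) : Int :=
  if PySem.List.pyGetD answers i 0 = PySem.List.pyGetD supo (PySem.Int.mod i n) 0 then 1 else 0

theorem stepA_eq (answers : List Int) (a b c i : Int) :
    stepA answers [a, b, c] i
      = [a + indic answers supo1L 5 i, b + indic answers supo2L 8 i, c + indic answers supo3L 10 i] := by
  unfold stepA indic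
  split_ifs <;> simp [List.set, List.getD]

-- A's interleaved loop, started at any 3-element state, accumulates the three independent sums
theorem loopA_eq (answers : List Int) (l : List Int) : ∀ (a b c : Int),
    l.foldl (stepA answers) [a, b, c]
      = [a + (l.map (indic answers supo1L 5)).sum,
         b + (l.map (indic answers supo2L 8)).sum,
         c + (l.map (indic answers supo3L 10)).sum] := by
  induction l with
  | nil => simp
  | cons x t ih =>
    intro a b c
    rw [List.foldl_cons, stepA_eq, ih]
    simp only [List.map_cons, List.sum_cons]
    congr 1
    · ring
    congr 1
    · ring
    congr 1
    · ring

-- a nodup list of residues hits the key (m, c) at most once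
theorem sum_ite_pair (v : Int → Int) (m c : Int) : ∀ (rs : List Int), rs.Nodup →
    (rs.map (fun r => if ((r, v r) : Int × Int) = (m, c) then (1 : Int) else 0)).sum
      = if m ∈ rs ∧ c = v m then 1 else 0 := by
  intro rs
  induction rs with
  | nil => simp
  | cons r t ih =>
    intro hnd
    rw [List.nodup_cons] at hnd
    rw [List.map_cons, List.sum_cons, ih hnd.2]
    by_cases h : ((r, v r) : Int × Int) = (m, c)
    · obtain ⟨rfl, rfl⟩ := Prod.mk.injEq .. ▸ h
      simp [hnd.1]
    · have hne : ¬ (m = r ∧ c = v m) := by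
        rintro ⟨rfl, rfl⟩; exact h rfl
      simp only [if_neg h, zero_add, List.mem_cons]
      by_cases hm : m ∈ t ∧ c = v m
      · rw [if_pos hm, if_pos ⟨Or.inr hm.1, hm.2⟩]
      · rw [if_neg hm, if_neg]
        rintro ⟨(rfl | hmt), hc⟩
        · exact hne ⟨rfl, hc⟩
        · exact hm ⟨hmt, hc⟩

-- swapping the two sums: total of the 40 per-residue counts = per-index indicator sum
theorem countsum (v g : Int → Int) : ∀ (I : List Int), (∀ j ∈ I, 0 ≤ j) →
    ((PySem.List.pyRange 0 40 1).map
      (fun r => ((I.map (fun j => ((PySem.Int.mod j 40, g j) : Int × Int))).count (r, v r) : Int))).sum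
      = (I.map (fun j => if g j = v (PySem.Int.mod j 40) then (1 : Int) else 0)).sum := by
  intro I
  induction I with
  | nil => simp
  | cons j t ih =>
    intro hpos
    have h0j : (0 : Int) ≤ j := hpos j (List.mem_cons_self ..)
    have hcount : ∀ r : Int,
        (((((PySem.Int.mod j 40, g j) : Int × Int) :: t.map (fun j => ((PySem.Int.mod j 40, g j) : Int × Int))).count (r, v r) : Int))
          = ((t.map (fun j => ((PySem.Int.mod j 40, g j) : Int × Int))).count (r, v r) : Int)
            + (if ((r, v r) : Int × Int) = (PySem.Int.mod j 40, g j) then 1 else 0) := by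
      intro r
      rw [List.count_cons]
      push_cast
      simp only [beq_iff_eq]
      rw [if_congr eq_comm rfl rfl]
    simp only [List.map_cons, List.sum_cons]
    rw [List.map_congr_left (fun r _ => hcount r), PySem.List.sum_map_add_int,
        ih (fun x hx => hpos x (List.mem_cons_of_mem _ hx)),
        sum_ite_pair v (PySem.Int.mod j 40) (g j) _ (PySem.List.nodup_pyRange_one 0 40)]
    have hmem : PySem.Int.mod j 40 ∈ PySem.List.pyRange 0 40 1 := by
      rw [PySem.List.mem_pyRange_one]
      exact ⟨PySem.Int.mod_nonneg j (by norm_num), PySem.Int.mod_lt j (by norm_num)⟩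
    have : (if PySem.Int.mod j 40 ∈ PySem.List.pyRange 0 40 1 ∧ g j = v (PySem.Int.mod j 40) then (1 : Int) else 0)
        = (if g j = v (PySem.Int.mod j 40) then (1 : Int) else 0) := by
      by_cases h : g j = v (PySem.Int.mod j 40)
      · rw [if_pos ⟨hmem, h⟩, if_pos h]
      · rw [if_neg (fun hc => h hc.2), if_neg h]
    rw [this]
    ring

-- (i % 40) % n = i % n for the three pattern lengths (n divides 40)
theorem mod_mod_40 (j n : Int) (hn : 0 < n) (hd : n ∣ 40) :
    PySem.Int.mod (PySem.Int.mod j 40) n = PySem.Int.mod j n := by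
  rw [PySem.Int.mod_eq_emod_of_pos (by norm_num : (0 : Int) < 40),
      PySem.Int.mod_eq_emod_of_pos hn, PySem.Int.mod_eq_emod_of_pos hn]
  exact Int.emod_emod_of_dvd j hd

-- B's dict-based score equals the indicator sum over the index range
theorem scoreB_eq (answers supo : List Int) (n : Int) (hn : 0 < n) (hd : n ∣ 40) :
    scoreB (freqB answers) supo n
      = ((PySem.List.pyRange 0 (answers.length : Int) 1).map (indic answers supo n)).sum := by
  have hfold : ((PySem.List.enumerate answers).map
          (fun p => ((PySem.Int.mod p.1 40, p.2) : Int × Int))).foldl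
          (fun d k => d.insert k (d.getD k 0 + 1)) PySem.Dict.empty
      = freqB answers := by
    unfold freqB; rw [List.foldl_map]
  unfold scoreB
  rw [← hfold]
  have hget : ∀ k : Int × Int,
      (((PySem.List.enumerate answers).map
        (fun p => ((PySem.Int.mod p.1 40, p.2) : Int × Int))).foldl
        (fun d k => d.insert k (d.getD k 0 + 1)) PySem.Dict.empty).getD k 0
      = (((PySem.List.enumerate answers).map
          (fun p => ((PySem.Int.mod p.1 40, p.2) : Int × Int))).count k : Int) := by
    intro k
    rw [PySem.Dict.getD_foldl_insert_add_one]
    simp [PySem.Dict.getD_empty]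
  simp only [hget]
  rw [PySem.List.enumerate_eq_map_pyRange (d := 0), List.map_map]
  have hI : ∀ j ∈ PySem.List.pyRange 0 ((answers.length : Int)) 1, (0 : Int) ≤ j := by
    intro j hj; exact (PySem.List.mem_pyRange_one.mp hj).1
  simp only [Function.comp_def, PySem.List.len_eq]
  rw [countsum (fun r => PySem.List.pyGetD supo (PySem.Int.mod r n) 0)
        (fun j => PySem.List.pyGetD answers j 0) _ hI]
  congr 1
  apply List.map_congr_left
  intro j hj
  unfold indic
  rw [mod_mod_40 j n hn hd]

-- ===== VERDICT (by name: the statement is the Claim_ definition above) =====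
set_option maxRecDepth 4000 in
theorem solution_spec : Claim_equal_solution := by
  intro answers _
  simp only [Spec_solution, solution, solution_alt]
  rw [loopA_eq,
      scoreB_eq answers supo1L 5 (by norm_num) (by norm_num),
      scoreB_eq answers supo2L 8 (by norm_num) (by norm_num),
      scoreB_eq answers supo3L 10 (by norm_num) (by norm_num)]
  simp only [zero_add]
  generalize ((PySem.List.pyRange 0 (answers.length : Int) 1).map (indic answers supo1L 5)).sum = s1
  generalize ((PySem.List.pyRange 0 (answers.length : Int) 1).map (indic answers supo2L 8)).sum = s2
  generalize ((PySem.List.pyRange 0 (answers.length : Int) 1).map (indic answers supo3L 10)).sum = s3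
  have hlen : ((([s1, s2, s3] : List Int).length : Int)) = 3 := by simp
  rw [hlen]
  have h3 : PySem.List.pyRange 0 3 1 = [0, 1, 2] := by decide
  rw [h3]
  have g0 : PySem.List.pyGetD [s1, s2, s3] 0 0 = s1 := by simp [PySem.List.pyGetD_ofNat']
  have g1 : PySem.List.pyGetD [s1, s2, s3] 1 0 = s2 := by simp [PySem.List.pyGetD_ofNat']
  have g2 : PySem.List.pyGetD [s1, s2, s3] 2 0 = s3 := by simp [PySem.List.pyGetD_ofNat']
  simp only [List.foldl_cons, List.foldl_nil, g0, g1, g2,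
    PySem.List.enumerate_cons, PySem.List.enumerate_nil, List.filter_cons, List.filter_nil]
  generalize (PySem.List.max? [s1, s2, s3] (fun y => y)).getD 0 = m
  by_cases c0 : s1 = m <;> by_cases c1 : s2 = m <;> by_cases c2 : s3 = m <;>
  simp [c0, c1, c2]
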